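-- pv_equiv track=rewrite | github.com/filinrey/small_program_set | python/xpcmder/xlog.py | check_and_insert_to_id_map
-- ===== SOURCE A (Python) =====
-- def check_and_insert_to_id_map(id_map, target_item):
--     same_items = []
--     source_index = 0
--     for source_item in id_map[target_item[0]]:
--         index = 0
--         is_same = True
--         for value in source_item:
--             if target_item[index] != ' ' and value != ' ' and target_item[index] != value:
--                 is_same = False
--                 break
--             if target_item[index] == ' ' and value != ' ':
--                 is_same = False
--                 break
--             index = index + 1
--         if is_same:
--             same_items.append(source_index)
--         source_index = source_index + 1
--
--     if len(same_items) > 0: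
--         sorted_items = sorted(same_items, key=lambda d: int(d), reverse=True)
--         for item in sorted_items:
--             del id_map[target_item[0]][item]
--         return 0
--
--     id_map[target_item[0]].append(target_item)
--     return 1
-- ===== SOURCE B (Python) =====
-- def _matches(source_item, target_item):
--     # wildcard match: a position passes iff source char is ' ' or equals target char;
--     # target_item[i] is read first so an IndexError surfaces exactly as in A
--     for i, value in enumerate(source_item):
--         t = target_item[i]
--         if value != ' ' and t != value:
--             return False
--     return True
--
--
-- def check_and_insert_to_id_map(id_map, target_item):
--     bucket = id_map[target_item[0]]
--     kept = [s for s in bucket if not _matches(s, target_item)]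
--     if len(kept) == len(bucket):
--         bucket.append(target_item)
--         return 1
--     bucket[:] = kept
--     return 0
-- ===== Notes on version B (the rewrite author's own statement) =====
-- stated objective: simpler
-- what changed: The two-branch wildcard test collapses to one condition (mismatch iff value != ' ' and target != value), and instead of collecting match indices, sorting them descending and deleting one by one, B filters the bucket in a single comprehension and writes it back with slice assignment, appending only when nothing was filtered.
import Mathlib
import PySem

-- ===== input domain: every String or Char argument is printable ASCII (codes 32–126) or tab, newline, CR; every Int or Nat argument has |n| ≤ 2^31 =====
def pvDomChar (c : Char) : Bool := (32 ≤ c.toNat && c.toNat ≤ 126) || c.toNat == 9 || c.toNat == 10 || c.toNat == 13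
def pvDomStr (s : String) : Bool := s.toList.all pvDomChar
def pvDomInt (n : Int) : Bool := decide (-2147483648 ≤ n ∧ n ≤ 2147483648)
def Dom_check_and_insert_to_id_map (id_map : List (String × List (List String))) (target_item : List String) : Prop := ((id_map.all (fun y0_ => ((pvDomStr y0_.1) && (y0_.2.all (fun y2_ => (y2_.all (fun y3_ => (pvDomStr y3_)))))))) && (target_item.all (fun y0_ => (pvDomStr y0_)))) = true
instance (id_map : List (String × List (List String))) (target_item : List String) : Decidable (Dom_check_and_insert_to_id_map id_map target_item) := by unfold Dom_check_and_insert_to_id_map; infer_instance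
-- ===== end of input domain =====

-- ===== PORT A =====
-- B changes decomposition only (one-pass filter instead of index collection + reverse deletion);
-- both Pythons also mutate id_map[target_item[0]] in place identically — the equivalence proved
-- here is about the RETURN value only.

-- first-match association-list lookup = Python dict lookup (dict -> assoc list convention)
def pvLookup (m : List (String × List (List String))) (k : String) : Option (List (List String)) :=
  match m with
  | [] => none
  | (a, b) :: rest => if a = k then some b else pvLookup rest k

-- inner loop of A: walk source_item with an index into target_item (out-of-range reads are
-- excluded by Pre_; getD "" stands for the would-be IndexError)
def pvRowA (target : List String) : List String → Nat → Bool
  | [], _ => true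
  | v :: rest, idx =>
      let t := (PySem.List.pyGet? target (Int.ofNat idx)).getD ""
      if t ≠ " " ∧ v ≠ " " ∧ t ≠ v then false
      else if t = " " ∧ v ≠ " " then false
      else pvRowA target rest (idx + 1)

-- outer loop of A: collect the indices of matching rows
def pvOuterA (target : List String) : List (List String) → List Int → Int → List Int
  | [], same_items, _ => same_items
  | s :: rest, same_items, source_index =>
      if pvRowA target s 0 then pvOuterA target rest (same_items ++ [source_index]) (source_index + 1)
      else pvOuterA target rest same_items (source_index + 1)

def check_and_insert_to_id_map (id_map : List (String × List (List String))) (target_item : List String) : Int :=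
  let key := (PySem.List.pyGet? target_item 0).getD ""
  let bucket := (pvLookup id_map key).getD []
  let same_items := pvOuterA target_item bucket [] 0
  -- A then sorts same_items descending and deletes those indices from the bucket (mutation
  -- of the argument, not modeled in this pure Int-returning port) and returns 0;
  -- else it appends target_item (mutation) and returns 1.
  if same_items.length > 0 then 0 else 1

-- ===== PORT B =====
-- B's _matches: single combined mismatch condition
def pvRowB (target : List String) : List String → Nat → Bool
  | [], _ => true
  | v :: rest, i =>
      let t := (PySem.List.pyGet? target (Int.ofNat i)).getD ""
      if v ≠ " " ∧ t ≠ v then false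
      else pvRowB target rest (i + 1)

def check_and_insert_to_id_map_alt (id_map : List (String × List (List String))) (target_item : List String) : Int :=
  let key := (PySem.List.pyGet? target_item 0).getD ""
  let bucket := (pvLookup id_map key).getD []
  let kept := bucket.filter (fun s => ! pvRowB target_item s 0)
  -- B appends (mutation) and returns 1 when nothing matched, else writes kept back and returns 0
  if kept.length = bucket.length then 1 else 0

-- ===== PRECONDITION & SPEC =====
-- Pre_ excludes exactly the inputs on which the Python A raises: an empty target_item
-- (IndexError on target_item[0]), a missing key (KeyError), and any bucket row whose scan walks
-- past the end of target_item, i.e. a row longer than target_item whose first |target_item|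
-- positions all pass the wildcard test (IndexError on target_item[index]).
def Pre_check_and_insert_to_id_map (id_map : List (String × List (List String))) (target_item : List String) : Prop :=
  target_item ≠ [] ∧
  (pvLookup id_map (target_item.headD "")).isSome ∧
  ∀ s ∈ (pvLookup id_map (target_item.headD "")).getD [],
    ¬ (target_item.length < s.length ∧
       ∀ j < target_item.length, (s[j]? = some " " ∨ s[j]? = target_item[j]?))

instance (id_map : List (String × List (List String))) (target_item : List String) : Decidable (Pre_check_and_insert_to_id_map id_map target_item) := by unfold Pre_check_and_insert_to_id_map; infer_instance

def pvWitness_check_and_insert_to_id_map : (List (String × List (List String))) × List String :=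
  ([("a", [["a", "x"]])], ["a", "y"])

def Spec_check_and_insert_to_id_map (id_map : List (String × List (List String))) (target_item : List String) (out : Int) : Prop := out = check_and_insert_to_id_map_alt id_map target_item
instance (id_map : List (String × List (List String))) (target_item : List String) (out : Int) : Decidable (Spec_check_and_insert_to_id_map id_map target_item out) := by unfold Spec_check_and_insert_to_id_map; infer_instance

-- ===== CLAIM (what is proved, stated in full; the proofs are below) =====
def Claim_equal_check_and_insert_to_id_map : Prop := ∀ (id_map : List (String × List (List String))) (target_item : List String), Dom_check_and_insert_to_id_map id_map target_item → Pre_check_and_insert_to_id_map id_map target_item → Spec_check_and_insert_to_id_map id_map target_item (check_and_insert_to_id_map id_map target_item)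

-- ===== LEMMAS AND PROOFS =====

-- the two row predicates agree: A's two failure branches are jointly equivalent to B's one
theorem pvRow_eq (target : List String) : ∀ (s : List String) (i : Nat),
    pvRowA target s i = pvRowB target s i := by
  intro s
  induction s with
  | nil => intro i; rfl
  | cons v rest ih =>
      intro i
      simp only [pvRowA, pvRowB]
      set t := (PySem.List.pyGet? target (Int.ofNat i)).getD "" with ht
      by_cases hv : v = " " <;> by_cases htv : t = v <;>
        simp [hv, htv, ih] <;> by_cases hts : t = " " <;> simp_all


-- length of A's collected index list = number of matching rows
theorem pvOuterA_length (target : List String) : ∀ (l : List (List String)) (acc : List Int) (idx : Int),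
    (pvOuterA target l acc idx).length = acc.length + l.countP (fun s => pvRowA target s 0) := by
  intro l
  induction l with
  | nil => intro acc idx; simp [pvOuterA]
  | cons s rest ih =>
      intro acc idx
      simp only [pvOuterA, List.countP_cons]
      by_cases h : pvRowA target s 0 = true <;> simp [h, ih] <;> omega

-- filter-complement partition of the length
theorem pv_filter_countP (p : List String → Bool) : ∀ (l : List (List String)),
    (l.filter (fun s => ! p s)).length + l.countP p = l.length := by
  intro l
  induction l with
  | nil => simp
  | cons s rest ih =>
      by_cases h : p s = true <;> simp [List.countP_cons, h] <;> omega

-- the whole return-value computation, for an arbitrary bucket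
theorem pv_main (target : List String) (bucket : List (List String)) :
    (if 0 < (pvOuterA target bucket [] 0).length then (0 : Int) else 1) =
    (if (bucket.filter (fun s => ! pvRowB target s 0)).length = bucket.length then (1 : Int) else 0) := by
  have hr : bucket.countP (fun s => pvRowA target s 0) = bucket.countP (fun s => pvRowB target s 0) := by
    congr 1; funext s; exact pvRow_eq target s 0
  have hA : (pvOuterA target bucket [] 0).length = bucket.countP (fun s => pvRowB target s 0) := by
    have := pvOuterA_length target bucket [] 0
    simpa [hr] using this
  have hB : (bucket.filter (fun s => ! pvRowB target s 0)).length
      + bucket.countP (fun s => pvRowB target s 0) = bucket.length :=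
    pv_filter_countP (fun s => pvRowB target s 0) bucket
  by_cases h : bucket.countP (fun s => pvRowB target s 0) = 0
  · have h1 : ¬ 0 < (pvOuterA target bucket [] 0).length := by omega
    have h2 : (bucket.filter (fun s => ! pvRowB target s 0)).length = bucket.length := by omega
    rw [if_neg h1, if_pos h2]
  · have h1 : 0 < (pvOuterA target bucket [] 0).length := by omega
    have h2 : (bucket.filter (fun s => ! pvRowB target s 0)).length ≠ bucket.length := by omega
    rw [if_pos h1, if_neg h2]

-- ===== VERDICT (by name: the statement is the Claim_ definition above) =====
theorem check_and_insert_to_id_map_spec : Claim_equal_check_and_insert_to_id_map := by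
  intro id_map target_item _ _
  unfold Spec_check_and_insert_to_id_map
  simp only [check_and_insert_to_id_map, check_and_insert_to_id_map_alt]
  exact pv_main target_item _
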